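-- pv_equiv track=rewrite | github.com/xtekky/TikTok-Web-Reverse | v1/crypto/info.py | str_to_word_array
-- ===== SOURCE A (Python) =====
-- def str_to_word_array(string, add_length):
--     length = len(string)
--     words = length >> 2
--
--     if 0 != (3 & length):
--         words += 1
--
--     if add_length:
--         w_array = [0] * (words + 1)
--         w_array[words] = length
--     else:
--         w_array = [0] * words
--
--     for index in range(length):
--         w_array[index >> 2] |= ord(string[index]) << ((3 & index) << 3)
--
--     return w_array
-- ===== SOURCE B (Python) =====
-- def _pack_word(string, length, w):
--     val = 0
--     for j in range(4):
--         i = 4 * w + j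
--         if i < length:
--             val |= ord(string[i]) << (8 * j)
--     return val
--
--
-- def str_to_word_array(string, add_length):
--     length = len(string)
--     words = (length >> 2) + (1 if length & 3 else 0)
--     w_array = [_pack_word(string, length, w) for w in range(words)]
--     if add_length:
--         w_array.append(length)
--     return w_array
-- ===== Notes on version B (the rewrite author's own statement) =====
-- stated objective: alternative
-- what changed: B iterates over the word slots, computing each 32-bit word once by OR-ing its up-to-4 byte contributions with a per-word helper, instead of A's per-character loop doing read-modify-write |= updates into a preallocated zero array.
import Mathlib
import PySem

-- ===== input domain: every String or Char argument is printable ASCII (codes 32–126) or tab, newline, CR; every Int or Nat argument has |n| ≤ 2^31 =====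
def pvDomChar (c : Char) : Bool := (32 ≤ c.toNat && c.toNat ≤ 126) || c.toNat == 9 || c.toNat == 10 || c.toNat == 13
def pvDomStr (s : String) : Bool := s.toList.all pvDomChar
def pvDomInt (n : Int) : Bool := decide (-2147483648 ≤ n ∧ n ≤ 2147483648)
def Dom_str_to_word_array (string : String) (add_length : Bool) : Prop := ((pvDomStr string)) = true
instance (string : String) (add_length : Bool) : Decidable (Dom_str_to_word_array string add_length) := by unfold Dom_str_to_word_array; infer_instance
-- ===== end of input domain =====

-- B iterates over the word slots, building each word once by OR-ing its up-to-4 byte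
-- contributions, instead of A's per-character read-modify-write into a preallocated array.

-- ===== PORT A =====
-- Python ord(c): the code point
def pvOrd (c : Char) : Int := (c.toNat : Int)

def str_to_word_array (string : String) (add_length : Bool) : List Int :=
  let length : Int := PySem.Str.len string
  let words0 : Int := length >>> (2 : Nat)
  let words : Int := if 0 ≠ PySem.Int.band 3 length then words0 + 1 else words0
  -- [0] * n is List.replicate n.toNat 0; w_array[words] = length: index `words` always in range, pySetD exact.
  let w_array : List Int :=
    if add_length then
      PySem.List.pySetD (List.replicate (words + 1).toNat 0) words length
    else
      List.replicate words.toNat 0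
  -- ord(string[index]) with 0 ≤ index < len(string): in range, pyGetD exact;
  -- shift amount (3 & index) << 3 is nonnegative, so .toNat is exact.
  (PySem.List.pyRange 0 length 1).foldl
    (fun (w_arr : List Int) (index : Int) =>
      PySem.List.pySetD w_arr (index >>> (2 : Nat))
        (PySem.Int.bor (PySem.List.pyGetD w_arr (index >>> (2 : Nat)) 0)
          (pvOrd (PySem.List.pyGetD string.toList index ' ') <<<
            ((PySem.Int.band 3 index) <<< (3 : Nat)).toNat)))
    w_array

-- ===== PORT B =====
-- _pack_word(string, length, w) from Source B: OR together the up-to-4 byte contributions of word w.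
-- string[i] with 0 ≤ i < length: in range, pyGetD exact; shift amount 8*j ≥ 0, .toNat exact.
def pvPackWord (cs : List Char) (length : Int) (w : Int) : Int :=
  (PySem.List.pyRange 0 4 1).foldl
    (fun (val : Int) (j : Int) =>
      let i : Int := 4 * w + j
      if i < length then
        PySem.Int.bor val (pvOrd (PySem.List.pyGetD cs i ' ') <<< (8 * j).toNat)
      else val)
    0

def str_to_word_array_alt (string : String) (add_length : Bool) : List Int :=
  let length : Int := PySem.Str.len string
  let words : Int := (length >>> (2 : Nat)) + (if PySem.Int.band length 3 ≠ 0 then 1 else 0)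
  let w_array : List Int := (PySem.List.pyRange 0 words 1).map (pvPackWord string.toList length)
  if add_length then w_array ++ [length] else w_array

-- ===== PRECONDITION & SPEC =====
def Spec_str_to_word_array (string : String) (add_length : Bool) (out : List Int) : Prop := out = str_to_word_array_alt string add_length
instance (string : String) (add_length : Bool) (out : List Int) : Decidable (Spec_str_to_word_array string add_length out) := by unfold Spec_str_to_word_array; infer_instance

-- ===== CLAIM (what is proved, stated in full; the proofs are below) =====
def Claim_equal_str_to_word_array : Prop := ∀ (string : String) (add_length : Bool), Dom_str_to_word_array string add_length → Spec_str_to_word_array string add_length (str_to_word_array string add_length)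

-- ===== LEMMAS AND PROOFS =====

-- bits OR-ed into slot m by A's loop over the first k characters
def pvAcc (cs : List Char) : Nat → Nat → Int
  | 0, _ => 0
  | k + 1, m =>
    if k / 4 = m then
      PySem.Int.bor (pvAcc cs k m) (pvOrd (cs.getD k ' ') <<< (8 * (k % 4)))
    else pvAcc cs k m

theorem pv_bor_nonneg {a b : Int} (ha : 0 ≤ a) (hb : 0 ≤ b) :
    0 ≤ PySem.Int.bor a b := by
  lift a to Nat using ha
  lift b to Nat using hb
  rw [PySem.Int.bor_natCast]
  positivity

theorem pv_bor_assoc (a b c : Int) (ha : 0 ≤ a) (hb : 0 ≤ b) (hc : 0 ≤ c) :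
    PySem.Int.bor (PySem.Int.bor a b) c = PySem.Int.bor a (PySem.Int.bor b c) := by
  lift a to Nat using ha
  lift b to Nat using hb
  lift c to Nat using hc
  rw [PySem.Int.bor_natCast, PySem.Int.bor_natCast, PySem.Int.bor_natCast,
    PySem.Int.bor_natCast, Nat.lor_assoc]

theorem pv_zero_bor (a : Int) : PySem.Int.bor 0 a = a := by
  rw [PySem.Int.bor_comm, PySem.Int.bor_zero]

theorem pv_shl_nonneg (a : Int) (s : Nat) (ha : 0 ≤ a) : 0 ≤ a <<< s := by
  rw [Int.shiftLeft_eq]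
  positivity

theorem pv_ord_nonneg (c : Char) : 0 ≤ pvOrd c := by
  simp [pvOrd]

theorem pvAcc_nonneg (cs : List Char) (k m : Nat) : 0 ≤ pvAcc cs k m := by
  induction k with
  | zero => simp [pvAcc]
  | succ k ih =>
    simp only [pvAcc]
    split_ifs
    · exact pv_bor_nonneg ih (pv_shl_nonneg _ _ (pv_ord_nonneg _))
    · exact ih

theorem pvAcc_hi (cs : List Char) (n m : Nat) (h : n ≤ 4 * m) : pvAcc cs n m = 0 := by
  induction n with
  | zero => rfl
  | succ k ih =>
    simp only [pvAcc]
    rw [if_neg (by omega)]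
    exact ih (by omega)

theorem pvAcc_succ (cs : List Char) (k m : Nat) :
    pvAcc cs (k + 1) m = if k / 4 = m then
      PySem.Int.bor (pvAcc cs k m) (pvOrd (cs.getD k ' ') <<< (8 * (k % 4)))
    else pvAcc cs k m := rfl

theorem pv_shr2 (k : Nat) : ((k : Int) >>> (2 : Nat)) = ((k / 4 : Nat) : Int) := by
  rw [Int.shiftRight_eq_div_pow]; omega

theorem pv_band3 (k : Nat) : PySem.Int.band 3 (k : Int) = ((k % 4 : Nat) : Int) := by
  rw [PySem.Int.band_comm, show (3 : Int) = ((3 : Nat) : Int) from rfl, PySem.Int.band_natCast]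
  congr 1
  exact Nat.and_two_pow_sub_one_eq_mod k 2

theorem pv_shiftamt (k : Nat) :
    ((PySem.Int.band 3 (k : Int)) <<< (3 : Nat)).toNat = 8 * (k % 4) := by
  rw [pv_band3, Int.shiftLeft_eq]
  omega

theorem pv_getD_set_self (l : List Int) (i : Nat) (v : Int) (h : i < l.length) :
    (l.set i v).getD i 0 = v := by
  rw [List.getD_eq_getElem?_getD, List.getElem?_set, if_pos rfl, if_pos h]
  rfl

theorem pv_getD_set_ne (l : List Int) (i j : Nat) (v : Int) (h : i ≠ j) :
    (l.set i v).getD j 0 = l.getD j 0 := by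
  rw [List.getD_eq_getElem?_getD, List.getD_eq_getElem?_getD, List.getElem?_set, if_neg h]

theorem pv_list_eq (xs ys : List Int) (hl : xs.length = ys.length)
    (h : ∀ i : Nat, i < xs.length → xs.getD i 0 = ys.getD i 0) : xs = ys := by
  apply List.ext_getElem hl
  intro i h1 h2
  have hh := h i h1
  rwa [List.getD_eq_getElem _ _ h1, List.getD_eq_getElem _ _ h2] at hh

theorem pv_getD_map_range (f : Nat → Int) (w i : Nat) (h : i < w) :
    ((List.range w).map f).getD i 0 = f i := by
  rw [List.getD_eq_getElem?_getD, List.getElem?_map, List.getElem?_range h]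
  rfl

theorem pv_getD_append_lt (xs : List Int) (x : Int) (i : Nat) (h : i < xs.length) :
    (xs ++ [x]).getD i 0 = xs.getD i 0 := by
  rw [List.getD_eq_getElem?_getD, List.getD_eq_getElem?_getD, List.getElem?_append_left h]

theorem pv_getD_append_self (xs : List Int) (x : Int) :
    (xs ++ [x]).getD xs.length 0 = x := by
  rw [List.getD_eq_getElem?_getD]
  simp

theorem pv_getD_replicate (n i : Nat) : (List.replicate n (0 : Int)).getD i 0 = 0 := by
  rw [List.getD_eq_getElem?_getD, List.getElem?_replicate]
  split <;> rfl

-- A's loop, elementwise: after the first k characters, slot m holds arr[m] | pvAcc cs k m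
theorem pvFold_spec (cs : List Char) (k : Nat) (arr : List Int)
    (hk : ∀ i : Nat, i < k → i / 4 < arr.length)
    (hnn : ∀ m : Nat, 0 ≤ arr.getD m 0) :
    ((PySem.List.pyRange 0 (k : Int) 1).foldl
      (fun (w_arr : List Int) (index : Int) =>
        PySem.List.pySetD w_arr (index >>> (2 : Nat))
          (PySem.Int.bor (PySem.List.pyGetD w_arr (index >>> (2 : Nat)) 0)
            (pvOrd (PySem.List.pyGetD cs index ' ') <<<
              ((PySem.Int.band 3 index) <<< (3 : Nat)).toNat))) arr).length = arr.length ∧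
    (∀ m : Nat,
      ((PySem.List.pyRange 0 (k : Int) 1).foldl
        (fun (w_arr : List Int) (index : Int) =>
          PySem.List.pySetD w_arr (index >>> (2 : Nat))
            (PySem.Int.bor (PySem.List.pyGetD w_arr (index >>> (2 : Nat)) 0)
              (pvOrd (PySem.List.pyGetD cs index ' ') <<<
                ((PySem.Int.band 3 index) <<< (3 : Nat)).toNat))) arr).getD m 0
        = PySem.Int.bor (arr.getD m 0) (pvAcc cs k m)) := by
  induction k with
  | zero =>
    rw [show ((0 : Nat) : Int) = 0 from rfl, PySem.List.pyRange_one_eq_nil le_rfl]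
    refine ⟨rfl, fun m => ?_⟩
    simp [pvAcc, PySem.Int.bor_zero]
  | succ k ih =>
    obtain ⟨ihlen, ihelem⟩ := ih (fun i hi => hk i (by omega))
    have hKdiv : k / 4 < arr.length := hk k (by omega)
    rw [show ((k + 1 : Nat) : Int) = (k : Int) + 1 from by omega,
      PySem.List.pyRange_one_succ_right (Int.natCast_nonneg k), List.foldl_append]
    simp only [List.foldl_cons, List.foldl_nil]
    simp only [pv_shr2, pv_shiftamt, PySem.List.pySetD_natCast, PySem.List.pyGetD_natCast]
    constructor
    · rw [List.length_set]
      exact ihlen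
    · intro m
      by_cases hm : m = k / 4
      · subst hm
        rw [pv_getD_set_self _ _ _ (by rw [ihlen]; exact hKdiv)]
        rw [ihelem (k / 4)]
        have hacc : pvAcc cs (k + 1) (k / 4)
            = PySem.Int.bor (pvAcc cs k (k / 4)) (pvOrd (cs.getD k ' ') <<< (8 * (k % 4))) := by
          simp [pvAcc]
        rw [hacc]
        exact pv_bor_assoc _ _ _ (hnn _) (pvAcc_nonneg _ _ _)
          (pv_shl_nonneg _ _ (pv_ord_nonneg _))
      · rw [pv_getD_set_ne _ _ _ _ (fun h => hm h.symm)]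
        rw [ihelem m]
        have hacc : pvAcc cs (k + 1) m = pvAcc cs k m := by
          simp only [pvAcc]
          rw [if_neg (fun h => hm h.symm)]
        rw [hacc]

-- A's per-slot accumulation over all n characters equals B's per-word packing
set_option maxHeartbeats 1000000 in
theorem pvAcc_eq_pack (cs : List Char) (n m : Nat) :
    pvAcc cs n m = pvPackWord cs (n : Int) (m : Int) := by
  have hrange : PySem.List.pyRange 0 4 1 = [0, 1, 2, 3] := by decide
  induction n with
  | zero =>
    simp only [pvAcc, pvPackWord, hrange, List.foldl]
    split_ifs <;> omega
  | succ k ih =>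
    by_cases hm : k / 4 = m
    · rcases (by omega : k = 4 * m ∨ k = 4 * m + 1 ∨ k = 4 * m + 2 ∨ k = 4 * m + 3)
        with h | h | h | h <;>
      · subst h
        rw [pvAcc_succ, if_pos hm, ih]
        first
        | rw [show (4 * m) % 4 = 0 from by omega]
        | rw [show (4 * m + 1) % 4 = 1 from by omega]
        | rw [show (4 * m + 2) % 4 = 2 from by omega]
        | rw [show (4 * m + 3) % 4 = 3 from by omega]
        simp only [pvPackWord, hrange, List.foldl]
        rw [show (4 * (m : Int) + 0) = ((4 * m : Nat) : Int) from by push_cast; ring,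
          show (4 * (m : Int) + 1) = ((4 * m + 1 : Nat) : Int) from by push_cast; ring,
          show (4 * (m : Int) + 2) = ((4 * m + 2 : Nat) : Int) from by push_cast; ring,
          show (4 * (m : Int) + 3) = ((4 * m + 3 : Nat) : Int) from by push_cast; ring,
          show ((8 : Int) * 0).toNat = 0 from rfl,
          show ((8 : Int) * 1).toNat = 8 from rfl,
          show ((8 : Int) * 2).toNat = 16 from rfl,
          show ((8 : Int) * 3).toNat = 24 from rfl]
        simp only [PySem.List.pyGetD_natCast]
        split_ifs <;> first | omega | norm_num
    · rw [pvAcc_succ, if_neg hm, ih]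
      simp only [pvPackWord, hrange, List.foldl]
      split_ifs <;> omega

theorem pv_main_list (cs : List Char) (add_length : Bool) :
    List.foldl
      (fun (w_arr : List Int) (index : Int) =>
        PySem.List.pySetD w_arr (index >>> (2 : Nat))
          (PySem.Int.bor (PySem.List.pyGetD w_arr (index >>> (2 : Nat)) 0)
            (pvOrd (PySem.List.pyGetD cs index ' ') <<<
              ((PySem.Int.band 3 index) <<< (3 : Nat)).toNat)))
      (if add_length = true then
        PySem.List.pySetD
          (List.replicate
            ((if 0 ≠ PySem.Int.band 3 (cs.length : Int) then ((cs.length : Int) >>> (2 : Nat)) + 1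
              else ((cs.length : Int) >>> (2 : Nat))) + 1).toNat 0)
          (if 0 ≠ PySem.Int.band 3 (cs.length : Int) then ((cs.length : Int) >>> (2 : Nat)) + 1
            else ((cs.length : Int) >>> (2 : Nat)))
          (cs.length : Int)
      else
        List.replicate
          (if 0 ≠ PySem.Int.band 3 (cs.length : Int) then ((cs.length : Int) >>> (2 : Nat)) + 1
            else ((cs.length : Int) >>> (2 : Nat))).toNat 0)
      (PySem.List.pyRange 0 (cs.length : Int) 1)
    = (if add_length = true then
        List.map (pvPackWord cs (cs.length : Int))
          (PySem.List.pyRange 0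
            (((cs.length : Int) >>> (2 : Nat)) +
              if PySem.Int.band (cs.length : Int) 3 ≠ 0 then 1 else 0) 1) ++ [(cs.length : Int)]
      else
        List.map (pvPackWord cs (cs.length : Int))
          (PySem.List.pyRange 0
            (((cs.length : Int) >>> (2 : Nat)) +
              if PySem.Int.band (cs.length : Int) 3 ≠ 0 then 1 else 0) 1)) := by
  have hwA : (if (0 : Int) ≠ PySem.Int.band 3 (cs.length : Int)
      then ((cs.length : Int) >>> (2 : Nat)) + 1 else ((cs.length : Int) >>> (2 : Nat)))
      = (((cs.length + 3) / 4 : Nat) : Int) := by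
    rw [pv_band3, pv_shr2]
    split_ifs with h <;> omega
  have hwB : (((cs.length : Int) >>> (2 : Nat))
      + (if PySem.Int.band (cs.length : Int) 3 ≠ 0 then 1 else 0))
      = (((cs.length + 3) / 4 : Nat) : Int) := by
    rw [PySem.Int.band_comm, pv_band3, pv_shr2]
    split_ifs with h <;> omega
  rw [hwA, hwB]
  have hB : (PySem.List.pyRange 0 (((cs.length + 3) / 4 : Nat) : Int) 1).map
        (pvPackWord cs (cs.length : Int))
      = (List.range ((cs.length + 3) / 4)).map
        (fun j => pvPackWord cs (cs.length : Int) ((j : Nat) : Int)) := by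
    rw [PySem.List.pyRange_zero_nat, List.map_map]
    rfl
  rw [hB]
  cases add_length with
  | false =>
    rw [if_neg Bool.false_ne_true, if_neg Bool.false_ne_true]
    rw [show (((cs.length + 3) / 4 : Nat) : Int).toNat = (cs.length + 3) / 4 from
      Int.toNat_natCast _]
    obtain ⟨hflen, hfelem⟩ := pvFold_spec cs cs.length
      (List.replicate ((cs.length + 3) / 4) 0)
      (fun i hi => by rw [List.length_replicate]; omega)
      (fun m => by rw [pv_getD_replicate])
    apply pv_list_eq
    · rw [hflen, List.length_replicate, List.length_map, List.length_range]
    · intro i hi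
      rw [hflen, List.length_replicate] at hi
      rw [hfelem i, pv_getD_replicate, pv_zero_bor, pvAcc_eq_pack,
        pv_getD_map_range _ _ _ hi]
  | true =>
    rw [if_pos rfl, if_pos rfl]
    rw [show ((((cs.length + 3) / 4 : Nat) : Int) + 1).toNat = (cs.length + 3) / 4 + 1 from
      by omega, PySem.List.pySetD_natCast]
    obtain ⟨hflen, hfelem⟩ := pvFold_spec cs cs.length
      ((List.replicate ((cs.length + 3) / 4 + 1) (0 : Int)).set ((cs.length + 3) / 4)
        (cs.length : Int))
      (fun i hi => by rw [List.length_set, List.length_replicate]; omega)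
      (fun m => by
        by_cases hmW : m = (cs.length + 3) / 4
        · subst hmW
          rw [pv_getD_set_self _ _ _ (by rw [List.length_replicate]; omega)]
          positivity
        · rw [pv_getD_set_ne _ _ _ _ (fun h => hmW h.symm), pv_getD_replicate])
    apply pv_list_eq
    · rw [hflen, List.length_set, List.length_replicate, List.length_append,
        List.length_map, List.length_range]
      rfl
    · intro i hi
      rw [hflen, List.length_set, List.length_replicate] at hi
      rw [hfelem i]
      by_cases hiW : i = (cs.length + 3) / 4
      · subst hiW
        rw [pv_getD_set_self _ _ _ (by rw [List.length_replicate]; omega)]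
        rw [pvAcc_hi cs cs.length ((cs.length + 3) / 4) (by omega), PySem.Int.bor_zero]
        have hself := pv_getD_append_self
          ((List.range ((cs.length + 3) / 4)).map
            (fun j => pvPackWord cs (cs.length : Int) ((j : Nat) : Int))) ((cs.length : Int))
        rw [List.length_map, List.length_range] at hself
        rw [hself]
      · have hiW' : i < (cs.length + 3) / 4 := by omega
        rw [pv_getD_set_ne _ _ _ _ (fun h => hiW h.symm), pv_getD_replicate, pv_zero_bor,
          pvAcc_eq_pack]
        rw [pv_getD_append_lt _ _ _ (by rw [List.length_map, List.length_range]; exact hiW')]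
        rw [pv_getD_map_range _ _ _ hiW']

theorem pv_main (string : String) (add_length : Bool) :
    str_to_word_array string add_length = str_to_word_array_alt string add_length := by
  simp only [str_to_word_array, str_to_word_array_alt, PySem.Str.len_eq]
  exact pv_main_list string.toList add_length

-- ===== VERDICT (by name: the statement is the Claim_ definition above) =====
theorem str_to_word_array_spec : Claim_equal_str_to_word_array := by
  intro string add_length _
  unfold Spec_str_to_word_array
  exact pv_main string add_length
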